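-- pv_equiv track=rewrite | github.com/mMahnoor/Practice_Problems | CF/ICPC/reach_value.py | fn
-- ===== SOURCE A (Python) =====
-- def fn(i, N, dp):
--     if i>N:
--         return "NO"
--     if i==N:
--         return "YES"
--     if (i in dp):
--         return dp[i]
--     if i<N:
--         op1 = fn(i*10, N, dp)
--         op2 = fn(i*20, N, dp)
--         if op1=="YES":
--             dp[i] = op1
--             return dp[i]
--         else:
--             dp[i] = op2
--             return dp[i]
-- ===== SOURCE B (Python) =====
-- def fn(i, N, dp):
--     if i > N:
--         return "NO"
--     if i == N:
--         return "YES"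
--     if i in dp:
--         return dp[i]
--     # Bottom-up DP instead of A's top-down memoised recursion: every node the
--     # recursion can visit is i * 2**u * 5**v with v <= u <= 2*v (v = number of
--     # steps taken), so fill a table level by level, deepest level first.
--     res = {}
--     for v in range(N.bit_length() - 1, -1, -1):
--         for u in range(v, 2 * v + 1):
--             j = i * 2 ** u * 5 ** v
--             if j >= N:
--                 continue
--             if j in dp:
--                 res[j] = dp[j]
--             else:
--                 r10 = "YES" if j * 10 == N else ("NO" if j * 10 > N else res[j * 10])
--                 r20 = "YES" if j * 20 == N else ("NO" if j * 20 > N else res[j * 20])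
--                 res[j] = "YES" if r10 == "YES" else r20
--     return res[i]
-- ===== Notes on version B (the rewrite author's own statement) =====
-- stated objective: alternative
-- what changed: Replaces A's top-down memoised *10/*20 recursion (which writes into the caller's dict) by a bottom-up DP: every node the recursion can visit is i*2^u*5^v with v <= u <= 2*v, so B fills a fresh table level by level, deepest level first, and reads off the answer for i; the caller's dict is only read, never written.
-- outside the precondition, e.g. on fn(-2, 7, {-20: 'xx', -40: 'yy'}): A returns 'yy', B raises KeyError
import Mathlib
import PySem

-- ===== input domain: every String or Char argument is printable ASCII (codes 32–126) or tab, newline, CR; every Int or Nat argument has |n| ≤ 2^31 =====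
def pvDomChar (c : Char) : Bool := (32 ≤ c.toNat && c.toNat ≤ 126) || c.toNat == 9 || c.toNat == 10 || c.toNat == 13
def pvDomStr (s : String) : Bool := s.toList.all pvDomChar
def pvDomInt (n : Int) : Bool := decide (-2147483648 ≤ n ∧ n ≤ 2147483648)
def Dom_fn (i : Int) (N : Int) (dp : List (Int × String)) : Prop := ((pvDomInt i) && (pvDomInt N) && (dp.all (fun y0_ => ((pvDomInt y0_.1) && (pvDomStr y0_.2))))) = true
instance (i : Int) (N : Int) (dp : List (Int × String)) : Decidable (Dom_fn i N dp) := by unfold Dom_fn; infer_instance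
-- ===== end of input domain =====

-- B replaces A's top-down memoised *10/*20 recursion by a bottom-up DP over the node
-- grid i·2^u·5^v (v ≤ u ≤ 2v), filled deepest level first; equivalence is about the
-- RETURN value only — A also fills the caller's memo dict dp in place, B only reads it.

-- ===== PORT A =====
-- A's Python recursion diverges for some inputs (e.g. i ≤ 0 < N), so the port takes a
-- Nat fuel that only makes it total (none = fuel ran out); 64 levels exceed the true
-- recursion depth on every input admitted by Pre_fn, so the fuel guard never fires there.
def fnAux : Nat → Int → Int → PySem.Dict Int String → Option (String × PySem.Dict Int String)
  | 0, _, _, _ => none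
  | fuel+1, i, N, dp =>
    if N < i then some ("NO", dp)                     -- if i>N: return "NO"
    else if i = N then some ("YES", dp)               -- if i==N: return "YES"
    else
      match dp.get? i with                            -- if (i in dp): return dp[i]
      | some v => some (v, dp)
      | none =>
        if i < N then
          match fnAux fuel (i*10) N dp with           -- op1 = fn(i*10, N, dp)
          | none => none
          | some (op1, dp1) =>
            match fnAux fuel (i*20) N dp1 with        -- op2 = fn(i*20, N, dp1)
            | none => none
            | some (op2, dp2) =>
              if op1 = "YES" then
                let dp3 := dp2.insert i op1           -- dp[i] = op1
                some (dp3.getD i "", dp3)             -- return dp[i]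
              else
                let dp3 := dp2.insert i op2           -- dp[i] = op2
                some (dp3.getD i "", dp3)             -- return dp[i]
        else none                                     -- falls off the end (returns None); unreachable: i < N holds here

def fn (i : Int) (N : Int) (dp : List (Int × String)) : String :=
  match fnAux 64 i N (PySem.Dict.mk dp) with
  | some (s, _) => s
  | none => ""

-- ===== PORT B =====
-- helpers for B's two nested loops (the body of `for u in range(v, 2*v+1)` and of the
-- outer `for v in range(N.bit_length()-1, -1, -1)`); `res[j*10]` / `res[j*20]` are total
-- here via `.getD ""` — Python raises KeyError there, reachable only outside Pre_fn,
-- and `2 ** u` is ported as `2 ^ u.toNat` (u ≥ 0 on every executed iteration).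
def stepB (i N : Int) (dp : List (Int × String)) (v : Int)
    (res : PySem.Dict Int String) (u : Int) : PySem.Dict Int String :=
  let j := i * 2 ^ u.toNat * 5 ^ v.toNat
  if N ≤ j then res
  else
    match (PySem.Dict.mk dp).get? j with
    | some w => res.insert j w
    | none =>
      let r10 := if j * 10 = N then "YES" else if N < j * 10 then "NO" else (res.get? (j * 10)).getD ""
      let r20 := if j * 20 = N then "YES" else if N < j * 20 then "NO" else (res.get? (j * 20)).getD ""
      res.insert j (if r10 = "YES" then "YES" else r20)

def levelB (i N : Int) (dp : List (Int × String))
    (res : PySem.Dict Int String) (v : Int) : PySem.Dict Int String :=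
  (PySem.List.pyRange v (2 * v + 1) 1).foldl (stepB i N dp v) res

def fn_alt (i : Int) (N : Int) (dp : List (Int × String)) : String :=
  if N < i then "NO"
  else if i = N then "YES"
  else
    match (PySem.Dict.mk dp).get? i with
    | some w => w
    | none =>
      let res := (PySem.List.pyRange ((PySem.Int.bitLength N : Int) - 1) (-1) (-1)).foldl
        (levelB i N dp) PySem.Dict.empty
      (res.get? i).getD ""

-- ===== PRECONDITION & SPEC =====
-- Pre_fn excludes only i ≤ 0 < i-below-N inputs: there A either recurses without bound
-- and raises RecursionError, or returns a prefilled cache string on a descent along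
-- non-positive nodes, where B's natural table raises KeyError itself.
def Pre_fn (i : Int) (N : Int) (dp : List (Int × String)) : Prop :=
  N ≤ i ∨ 1 ≤ i
instance (i : Int) (N : Int) (dp : List (Int × String)) : Decidable (Pre_fn i N dp) := by unfold Pre_fn; infer_instance

def pvWitness_fn : Int × Int × (List (Int × String)) := (2, 40, [])

def Spec_fn (i : Int) (N : Int) (dp : List (Int × String)) (out : String) : Prop := out = fn_alt i N dp
instance (i : Int) (N : Int) (dp : List (Int × String)) (out : String) : Decidable (Spec_fn i N dp out) := by unfold Spec_fn; infer_instance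

-- ===== CLAIM (what is proved, stated in full; the proofs are below) =====
def Claim_equal_fn : Prop := ∀ (i : Int) (N : Int) (dp : List (Int × String)), Dom_fn i N dp → Pre_fn i N dp → Spec_fn i N dp (fn i N dp)

-- ===== LEMMAS AND PROOFS =====

-- the common specification: A's recursion purified — memo writes removed, only the
-- caller's ORIGINAL dict dp0 is consulted (the `1 ≤ j` guard makes it total; every
-- node either port actually evaluates under Pre_fn satisfies it)
def RFun (N : Int) (dp0 : List (Int × String)) (j : Int) : String :=
  if N < j then "NO"
  else if j = N then "YES"
  else
    match (PySem.Dict.mk dp0).get? j with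
    | some v => v
    | none =>
      if h : 1 ≤ j then
        if RFun N dp0 (j * 10) = "YES" then "YES" else RFun N dp0 (j * 20)
      else ""
termination_by (N - j).toNat
decreasing_by all_goals omega

-- A-side loop invariant: the evolving memo dict extends dp0 and every entry below N
-- holds the pure value
def InvD (N : Int) (dp0 : List (Int × String)) (dp : PySem.Dict Int String) : Prop :=
  (∀ k v, (PySem.Dict.mk dp0).get? k = some v → dp.get? k = some v) ∧
  (∀ k v, dp.get? k = some v → k < N → v = RFun N dp0 k)

-- B-side loop invariant: the DP table holds the pure value at every grid node of
-- level ≥ w below N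
def Done (N : Int) (dp0 : List (Int × String)) (i : Int) (w : Nat)
    (res : PySem.Dict Int String) : Prop :=
  ∀ u v : Nat, w ≤ v → v ≤ u → u ≤ 2 * v → i * 2 ^ u * 5 ^ v < N →
    res.get? (i * 2 ^ u * 5 ^ v) = some (RFun N dp0 (i * 2 ^ u * 5 ^ v))

theorem RFun_gt {N j : Int} (dp0 : List (Int × String)) (h : N < j) :
    RFun N dp0 j = "NO" := by
  rw [RFun, if_pos h]

theorem RFun_eq {N j : Int} (dp0 : List (Int × String)) (h : j = N) :
    RFun N dp0 j = "YES" := by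
  rw [RFun, if_neg (by omega), if_pos h]

theorem RFun_hit {N j : Int} {dp0 : List (Int × String)} {w : String} (h : j < N)
    (hdp : (PySem.Dict.mk dp0).get? j = some w) : RFun N dp0 j = w := by
  rw [RFun, if_neg (by omega), if_neg (by omega), hdp]

theorem RFun_step {N j : Int} {dp0 : List (Int × String)} (h : j < N) (hj : 1 ≤ j)
    (hdp : (PySem.Dict.mk dp0).get? j = none) :
    RFun N dp0 j = if RFun N dp0 (j * 10) = "YES" then "YES" else RFun N dp0 (j * 20) := by
  rw [RFun, if_neg (by omega), if_neg (by omega), hdp]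
  simp only [dif_pos hj]

-- uniqueness of the p-adic factorisation
theorem pow_mul_eq_pow_mul {p : Int} (hp : 2 ≤ p) :
    ∀ (a c : Nat) (u v : Int), ¬ p ∣ u → ¬ p ∣ v → p ^ a * u = p ^ c * v → a = c ∧ u = v := by
  intro a
  induction a with
  | zero =>
    intro c u v hu hv heq
    match c with
    | 0 => simpa using heq
    | c+1 =>
      exfalso; apply hu
      rw [pow_zero, one_mul] at heq
      exact heq ▸ Dvd.intro (p ^ c * v) (by ring)
  | succ a ih =>
    intro c u v hu hv heq
    match c with
    | 0 =>
      exfalso; apply hv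
      rw [pow_zero, one_mul] at heq
      exact heq ▸ Dvd.intro (p ^ a * u) (by ring)
    | c+1 =>
      have hp0 : p ≠ 0 := by omega
      have heq' : p ^ a * u = p ^ c * v := by
        have : p * (p ^ a * u) = p * (p ^ c * v) := by
          rw [pow_succ, pow_succ] at heq; linear_combination heq
        exact mul_left_cancel₀ hp0 this
      obtain ⟨h1, h2⟩ := ih c u v hu hv heq'
      exact ⟨by omega, h2⟩

theorem not_two_dvd_pow_five (b : Nat) : ¬ (2:Int) ∣ 5 ^ b := by
  intro h
  have := Int.prime_two.dvd_of_dvd_pow h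
  omega

theorem gridKey_inj {i : Int} (hi : 1 ≤ i) {a b c d : Nat}
    (h : i * 2 ^ a * 5 ^ b = i * 2 ^ c * 5 ^ d) : a = c ∧ b = d := by
  have h' : (2:Int) ^ a * 5 ^ b = 2 ^ c * 5 ^ d := by
    have := mul_left_cancel₀ (show i ≠ 0 by omega)
      (show i * (2 ^ a * 5 ^ b) = i * (2 ^ c * 5 ^ d) by linear_combination h)
    exact this
  obtain ⟨hac, hbd⟩ := pow_mul_eq_pow_mul (p := 2) (by norm_num) a c (5 ^ b) (5 ^ d)
    (not_two_dvd_pow_five b) (not_two_dvd_pow_five d) h'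
  refine ⟨hac, ?_⟩
  have hnat : (5:Nat) ^ b = 5 ^ d := by exact_mod_cast hbd
  exact Nat.pow_right_injective (by norm_num) hnat

theorem pyRange_desc_nil : PySem.List.pyRange (-1) (-1) (-1) = [] := by decide

theorem pyRange_desc_cons (a : Int) (ha : 0 ≤ a) :
    PySem.List.pyRange a (-1) (-1) = a :: PySem.List.pyRange (a - 1) (-1) (-1) := by
  obtain ⟨m, rfl⟩ := Int.eq_ofNat_of_zero_le ha
  simp only [PySem.List.pyRange]
  norm_num
  cases m with
  | zero => simp
  | succ m =>
    rw [if_pos (by exact_mod_cast by omega : (-1:Int) < (m+1:Nat)), if_pos (by omega)]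
    rw [List.range_succ_eq_map]
    simp only [List.map_cons, List.map_map, Function.comp_def]
    congr 1
    · push_cast; ring_nf

theorem pyRange_one_nil (a b : Int) (h : b ≤ a) : PySem.List.pyRange a b 1 = [] := by
  simp [PySem.List.pyRange]
  intro h2; omega

theorem grid_ge {i : Int} (hi : 1 ≤ i) (u v : Nat) : i ≤ i * 2 ^ u * 5 ^ v := by
  have h2 : (1:Int) ≤ 2 ^ u := one_le_pow₀ (by norm_num)
  have h5 : (1:Int) ≤ 5 ^ v := one_le_pow₀ (by norm_num)
  calc i ≤ i * 2 ^ u := le_mul_of_one_le_right (by omega) h2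
    _ ≤ i * 2 ^ u * 5 ^ v := le_mul_of_one_le_right (by positivity) h5

theorem grid_pos {i : Int} (hi : 1 ≤ i) (u v : Nat) : 1 ≤ i * 2 ^ u * 5 ^ v :=
  le_trans hi (grid_ge hi u v)

theorem fnAux_spec (N : Int) (dp0 : List (Int × String)) :
    ∀ (fuel : Nat) (i : Int) (dp : PySem.Dict Int String),
    1 ≤ i → InvD N dp0 dp → N ≤ i * 10 ^ fuel →
    ∃ dp', fnAux (fuel+1) i N dp = some (RFun N dp0 i, dp') ∧ InvD N dp0 dp' := by
  intro fuel
  induction fuel with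
  | zero =>
    intro i dp hi hinv hle
    rw [pow_zero, mul_one] at hle
    rw [fnAux]
    by_cases hlt : N < i
    · rw [if_pos hlt, RFun_gt dp0 hlt]
      exact ⟨dp, rfl, hinv⟩
    · have heq : i = N := by omega
      rw [if_neg (by omega), if_pos heq, RFun_eq dp0 heq]
      exact ⟨dp, rfl, hinv⟩
  | succ fuel ih =>
    intro i dp hi hinv hle
    rw [fnAux]
    rcases lt_trichotomy N i with hlt | heq | hgt
    · rw [if_pos hlt, RFun_gt dp0 hlt]
      exact ⟨dp, rfl, hinv⟩
    · rw [if_neg (by omega), if_pos heq.symm, RFun_eq dp0 heq.symm]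
      exact ⟨dp, rfl, hinv⟩
    · rw [if_neg (by omega), if_neg (by omega)]
      cases hdp : dp.get? i with
      | some v =>
        exact ⟨dp, by rw [hinv.2 i v hdp hgt], hinv⟩
      | none =>
        rw [if_pos hgt]
        have hdp0 : (PySem.Dict.mk dp0).get? i = none := by
          cases hdp0 : (PySem.Dict.mk dp0).get? i with
          | none => rfl
          | some w => rw [hinv.1 i w hdp0] at hdp; cases hdp
        have hpow : (0:Int) < 10 ^ fuel := by positivity
        have h10 : N ≤ i * 10 * 10 ^ fuel := by
          rw [pow_succ] at hle; nlinarith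
        obtain ⟨dp1, he1, hinv1⟩ := ih (i*10) dp (by omega) hinv h10
        have h20 : N ≤ i * 20 * 10 ^ fuel := by nlinarith
        obtain ⟨dp2, he2, hinv2⟩ := ih (i*20) dp1 (by omega) hinv1 h20
        simp only [he1, he2]
        have hR := RFun_step hgt hi hdp0
        have hins : ∀ s, s = RFun N dp0 i →
            InvD N dp0 (dp2.insert i s) := by
          intro s hs
          constructor
          · intro k v hk
            rw [PySem.Dict.get?_insert]
            split_ifs with hki
            · subst hki; rw [hdp0] at hk; cases hk
            · exact hinv2.1 k v hk
          · intro k v hk hkN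
            rw [PySem.Dict.get?_insert] at hk
            split_ifs at hk with hki
            · cases hk; rw [hs, hki]
            · exact hinv2.2 k v hk hkN
        by_cases hy : RFun N dp0 (i*10) = "YES"
        · have hRi : RFun N dp0 i = "YES" := by rw [hR, if_pos hy]
          rw [if_pos hy, hy]
          refine ⟨_, ?_, hins "YES" hRi.symm⟩
          rw [PySem.Dict.getD_insert_self, hRi]
        · rw [if_neg hy]
          have hRi : RFun N dp0 i = RFun N dp0 (i*20) := by rw [hR, if_neg hy]
          refine ⟨_, ?_, hins _ hRi.symm⟩
          rw [PySem.Dict.getD_insert_self, hRi]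

theorem inner_fold (i N : Int) (dp : List (Int × String)) (hi : 1 ≤ i) (v : Nat) :
    ∀ (c u0 : Nat), v ≤ u0 → u0 + c = 2 * v + 1 →
    ∀ res, Done N dp i (v+1) res →
    (∀ un : Nat, v ≤ un → un < u0 → i * 2 ^ un * 5 ^ v < N →
        res.get? (i * 2 ^ un * 5 ^ v) = some (RFun N dp (i * 2 ^ un * 5 ^ v))) →
    Done N dp i (v+1) ((PySem.List.pyRange (u0:Int) (2*(v:Int)+1) 1).foldl (stepB i N dp (v:Int)) res) ∧
    (∀ un : Nat, v ≤ un → un ≤ 2 * v → i * 2 ^ un * 5 ^ v < N →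
        ((PySem.List.pyRange (u0:Int) (2*(v:Int)+1) 1).foldl (stepB i N dp (v:Int)) res).get?
          (i * 2 ^ un * 5 ^ v) = some (RFun N dp (i * 2 ^ un * 5 ^ v))) := by
  intro c
  induction c with
  | zero =>
    intro u0 hvu0 hsum res hdone hproc
    rw [pyRange_one_nil _ _ (by omega)]
    simp only [List.foldl_nil]
    exact ⟨hdone, fun un h1 h2 h3 => hproc un h1 (by omega) h3⟩
  | succ c ih =>
    intro u0 hvu0 hsum res hdone hproc
    rw [PySem.List.pyRange_one_cons (by omega), List.foldl_cons]
    by_cases hjN : N ≤ i * 2 ^ u0 * 5 ^ v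
    · have hstep : stepB i N dp (v:Int) res (u0:Int) = res := by
        unfold stepB
        simp only [Int.toNat_natCast]
        rw [if_pos hjN]
      rw [hstep, show ((u0:Int)+1) = ((u0+1 : Nat):Int) by push_cast; ring]
      exact ih (u0+1) (by omega) (by omega) res hdone (fun un h1 h2 h3 => by
        rcases Nat.lt_succ_iff_lt_or_eq.mp h2 with h | h
        · exact hproc un h1 h h3
        · exact absurd h3 (by rw [h]; omega))
    · rw [not_le] at hjN
      set j := i * 2 ^ u0 * 5 ^ v with hjdef
      have hj1 : 1 ≤ j := grid_pos hi u0 v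
      have hkey10 : j * 10 = i * 2 ^ (u0+1) * 5 ^ (v+1) := by
        rw [hjdef, pow_succ, pow_succ]; ring
      have hkey20 : j * 20 = i * 2 ^ (u0+2) * 5 ^ (v+1) := by
        rw [hjdef, pow_succ, pow_succ, pow_succ]; ring
      have hr10 : (if j * 10 = N then "YES" else if N < j * 10 then "NO"
            else ((res.get? (j * 10)).getD "")) = RFun N dp (j * 10) := by
        split_ifs with h1 h2
        · rw [RFun_eq dp h1]
        · rw [RFun_gt dp h2]
        · have := hdone (u0+1) (v+1) (by omega) (by omega) (by omega)
            (by rw [← hkey10]; omega)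
          rw [← hkey10] at this
          rw [this]; rfl
      have hr20 : (if j * 20 = N then "YES" else if N < j * 20 then "NO"
            else ((res.get? (j * 20)).getD "")) = RFun N dp (j * 20) := by
        split_ifs with h1 h2
        · rw [RFun_eq dp h1]
        · rw [RFun_gt dp h2]
        · have := hdone (u0+2) (v+1) (by omega) (by omega) (by omega)
            (by rw [← hkey20]; omega)
          rw [← hkey20] at this
          rw [this]; rfl
      have hstep : ∃ s, stepB i N dp (v:Int) res (u0:Int) = res.insert j s ∧
          s = RFun N dp j := by
        unfold stepB
        simp only [Int.toNat_natCast, ← hjdef]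
        rw [if_neg (by omega)]
        cases hdpj : (PySem.Dict.mk dp).get? j with
        | some w =>
          exact ⟨w, rfl, (RFun_hit hjN hdpj).symm⟩
        | none =>
          rw [hr10, hr20]
          exact ⟨_, rfl, (RFun_step hjN hj1 hdpj).symm⟩
      obtain ⟨s, hstepeq, hsR⟩ := hstep
      rw [hstepeq, show ((u0:Int)+1) = ((u0+1 : Nat):Int) by push_cast; ring]
      apply ih (u0+1) (by omega) (by omega)
      · intro u' v' h1 h2 h3 h4
        have hne : i * 2 ^ u' * 5 ^ v' ≠ j := fun he => by
          obtain ⟨_, hv'⟩ := gridKey_inj hi (he.trans hjdef)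
          omega
        rw [PySem.Dict.get?_insert, if_neg hne]
        exact hdone u' v' h1 h2 h3 h4
      · intro un h1 h2 h3
        rcases Nat.lt_succ_iff_lt_or_eq.mp h2 with h | h
        · have hne : i * 2 ^ un * 5 ^ v ≠ j := fun he => by
            obtain ⟨hu', _⟩ := gridKey_inj hi (he.trans hjdef)
            omega
          rw [PySem.Dict.get?_insert, if_neg hne]
          exact hproc un h1 h h3
        · subst h
          rw [← hjdef, PySem.Dict.get?_insert_self, hsR]

theorem outer_fold (i N : Int) (dp : List (Int × String)) (hi : 1 ≤ i) :
    ∀ (w : Nat) (res : PySem.Dict Int String), Done N dp i w res →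
      Done N dp i 0 ((PySem.List.pyRange ((w:Int) - 1) (-1) (-1)).foldl (levelB i N dp) res) := by
  intro w
  induction w with
  | zero =>
    intro res hres
    rw [show ((0:Nat):Int) - 1 = -1 by norm_num, pyRange_desc_nil]
    simpa using hres
  | succ w ih =>
    intro res hres
    rw [show ((w+1:Nat):Int) - 1 = ((w:Nat):Int) by push_cast; ring,
      pyRange_desc_cons _ (by positivity), List.foldl_cons]
    have hinner := inner_fold i N dp hi w (w+1) w le_rfl (by omega) res hres
      (fun un h1 h2 _ => absurd h2 (by omega))
    have hres' : Done N dp i w (levelB i N dp res (w:Int)) := by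
      intro u v hv hvu h2v hlt
      by_cases hvw : v = w
      · subst hvw
        exact hinner.2 u hvu h2v hlt
      · exact hinner.1 u v (by omega) hvu h2v hlt
    exact ih _ hres'

theorem done_top (i N : Int) (dp : List (Int × String)) (hi : 1 ≤ i)
    (res : PySem.Dict Int String) : Done N dp i (PySem.Int.bitLength N) res := by
  intro u v hv huv h2v hlt
  exfalso
  have h1 : (N.natAbs : Int) < 2 ^ (PySem.Int.bitLength N) := by
    exact_mod_cast PySem.Int.lt_two_pow_bitLength N
  have h2 : (2:Int) ^ (PySem.Int.bitLength N) ≤ 2 ^ u :=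
    pow_le_pow_right₀ (by norm_num) (le_trans hv huv)
  have h5 : (1:Int) ≤ 5 ^ v := one_le_pow₀ (by norm_num)
  have h3 : (2:Int) ^ u ≤ i * 2 ^ u * 5 ^ v := by
    have hp : (0:Int) < 2 ^ u := by positivity
    calc (2:Int) ^ u ≤ i * 2 ^ u := le_mul_of_one_le_left (by positivity) hi
      _ ≤ i * 2 ^ u * 5 ^ v := le_mul_of_one_le_right (by nlinarith) h5
  have h4 : N ≤ (N.natAbs : Int) := Int.le_natAbs
  omega

-- ===== VERDICT (by name: the statement is the Claim_ definition above) =====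
theorem fn_spec : Claim_equal_fn := by
  intro i N dp hdom hpre
  unfold Spec_fn
  have hN : N ≤ 2147483648 := by
    simp [Dom_fn, pvDomInt] at hdom
    omega
  rcases lt_trichotomy N i with hlt | heq | hgt
  · have hA : fn i N dp = "NO" := by
      unfold fn
      rw [show (64:Nat) = 63+1 by norm_num, fnAux, if_pos hlt]
    have hB : fn_alt i N dp = "NO" := by
      unfold fn_alt; rw [if_pos hlt]
    rw [hA, hB]
  · have hA : fn i N dp = "YES" := by
      unfold fn
      rw [show (64:Nat) = 63+1 by norm_num, fnAux, if_neg (by omega), if_pos heq.symm]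
    have hB : fn_alt i N dp = "YES" := by
      unfold fn_alt; rw [if_neg (by omega), if_pos heq.symm]
    rw [hA, hB]
  · have hi1 : 1 ≤ i := hpre.resolve_left (by omega)
    have hinv : InvD N dp (PySem.Dict.mk dp) := ⟨fun _ _ h => h,
      fun k v hk hkN => (RFun_hit hkN hk).symm⟩
    have hle : N ≤ i * 10 ^ 63 := by
      have hp : (2147483648:Int) ≤ 10 ^ 63 := by norm_num
      have h2 : (10:Int) ^ 63 ≤ i * 10 ^ 63 := le_mul_of_one_le_left (by positivity) hi1
      omega
    obtain ⟨dp', he, _⟩ := fnAux_spec N dp 63 i (PySem.Dict.mk dp) hi1 hinv hle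
    have hA : fn i N dp = RFun N dp i := by
      unfold fn
      rw [show (64:Nat) = 63+1 by norm_num, he]
    rw [hA]
    unfold fn_alt
    rw [if_neg (by omega), if_neg (by omega)]
    cases hdpi : (PySem.Dict.mk dp).get? i with
    | some w =>
      rw [RFun_hit hgt hdpi]
    | none =>
      have hdone := outer_fold i N dp hi1 (PySem.Int.bitLength N) PySem.Dict.empty
        (done_top i N dp hi1 PySem.Dict.empty)
      have hget := hdone 0 0 (le_refl 0) (le_refl 0) (by omega) (by simpa using hgt)
      simp only [pow_zero, mul_one] at hget
      show RFun N dp i = ((PySem.List.pyRange ((PySem.Int.bitLength N : Int) - 1) (-1) (-1)).foldl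
        (levelB i N dp) PySem.Dict.empty |>.get? i).getD ""
      rw [hget]
      rfl
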